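-- pv_equiv track=rewrite | github.com/rosenbrockc/fortpy | fortpy/testing/method.py | _present_params
-- ===== SOURCE A (Python) =====
-- def _present_params(paramlist, spacing = 0):
--     """Creates the (paramlist) for a method call formatted nicely for calls
--     with lots of parameters."""
--     #The +2 is spacing is for the tab indent at the start of the line.
--     #The +3 is for indent and the extra parenthesis at the start of the call.
--     line = []
--     length = 0
--     result = []
--     for param in paramlist:
--         extra = len(list(param))
--         if length + extra + 2 + spacing > 90:
--             result.append(", ".join(line) + ", &")
--             line = [ param ]
--             length = extra + 2
--         else:
--             line.append(param)
--             length += extra + 2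
--
--     #Add on the remaining bits of the line
--     result.append(", ".join(line))
--
--     return "\n{}".format(" ".join([ "" for i in range(spacing + 3)])).join(result)
-- ===== SOURCE B (Python) =====
-- def _present_params(paramlist, spacing = 0):
--     """Creates the (paramlist) for a method call formatted nicely for calls
--     with lots of parameters."""
--     # A line may hold params while the running total of len(p)+2 units,
--     # checked before adding each param, stays within 88 - spacing.
--     limit = 88 - spacing
--     sep = "\n" + " " * max(spacing + 2, 0)
--
--     def fit(start, used):
--         """First index >= start at which the line (occupying `used` units) breaks."""
--         k = start
--         while k < len(paramlist) and used + len(paramlist[k]) <= limit: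
--             used += len(paramlist[k]) + 2
--             k += 1
--         return k
--
--     # Emit one output line per group: slice the list at the fit point, with the
--     # breaking parameter forced onto the next line.
--     out = []
--     start, pre, used = 0, [], 0
--     while True:
--         k = fit(start, used)
--         if k == len(paramlist):
--             out.append(", ".join(pre + paramlist[start:k]))
--             return sep.join(out)
--         out.append(", ".join(pre + paramlist[start:k]) + ", &")
--         head = paramlist[k]
--         pre, used, start = [head], len(head) + 2, k + 1
-- ===== Notes on version B (the rewrite author's own statement) =====
-- stated objective: alternative
-- what changed: B replaces A's per-parameter state machine (mutable line/length/result accumulators) with a recursive group-at-a-time decomposition: a fit helper finds the longest prefix fitting within a precomputed limit (88 - spacing), the list is sliced there, and the remaining suffix is rendered by recursion with the breaking parameter forced onto the next line.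
import Mathlib
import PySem

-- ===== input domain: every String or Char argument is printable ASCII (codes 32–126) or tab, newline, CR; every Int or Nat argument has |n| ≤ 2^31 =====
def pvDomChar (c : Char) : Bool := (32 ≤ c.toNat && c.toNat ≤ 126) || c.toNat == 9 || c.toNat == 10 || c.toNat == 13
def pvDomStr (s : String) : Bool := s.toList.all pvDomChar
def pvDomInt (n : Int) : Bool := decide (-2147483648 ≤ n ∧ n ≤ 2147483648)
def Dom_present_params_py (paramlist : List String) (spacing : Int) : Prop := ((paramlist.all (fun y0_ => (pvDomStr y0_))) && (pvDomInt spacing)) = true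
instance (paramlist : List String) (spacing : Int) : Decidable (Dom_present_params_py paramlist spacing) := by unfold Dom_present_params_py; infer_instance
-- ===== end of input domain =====

-- B renders the call group by group: a fit helper finds the longest prefix that fits
-- within a precomputed limit, the list is sliced there, and the suffix is rendered by
-- recursion — instead of A's per-parameter state machine (objective: alternative).

-- ===== PORT A =====
-- A's loop over paramlist, state = (line, length, result), exactly as in the Python.
def ppLoopA (spacing : Int) : List String → (List String × Int × List String) → (List String × Int × List String)
  | [], st => st
  | param :: rest, (line, length, result) =>
    let extra : Int := PySem.Str.len param
    if length + extra + 2 + spacing > 90 then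
      ppLoopA spacing rest ([param], extra + 2, result ++ [PySem.Str.join ", " line ++ ", &"])
    else
      ppLoopA spacing rest (line ++ [param], length + extra + 2, result)

def present_params_py (paramlist : List String) (spacing : Int) : String :=
  let st := ppLoopA spacing paramlist ([], 0, [])
  let result := st.2.2 ++ [PySem.Str.join ", " st.1]
  -- "\n{}".format(" ".join(["" for i in range(spacing + 3)]))
  let sep := "\n" ++ PySem.Str.join " " ((PySem.List.pyRange 0 (spacing + 3) 1).map (fun _ => ""))
  PySem.Str.join sep result

-- ===== PORT B =====
-- fit(params, used): length of the longest prefix of params fitting after `used` units.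
def ppFitB (limit : Int) : List String → Int → Nat
  | [], _ => 0
  | p :: rest, used =>
    if used + PySem.Str.len p > limit then 0
    else ppFitB limit rest (used + PySem.Str.len p + 2) + 1

theorem ppFitB_le (limit : Int) (l : List String) : ∀ used, ppFitB limit l used ≤ l.length := by
  induction l with
  | nil => intro used; simp [ppFitB]
  | cons p rest ih =>
    intro used
    simp only [ppFitB, List.length_cons]
    split
    · omega
    · have := ih (used + PySem.Str.len p + 2); omega

-- lines(params, pre, used): render group by group, slicing at the fit point.
def ppLinesB (limit : Int) (params : List String) (pre : List String) (used : Int) : List String :=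
  let k := ppFitB limit params used
  if hk : k = params.length then
    [PySem.Str.join ", " (pre ++ params)]
  else
    let head := params.getD k ""
    (PySem.Str.join ", " (pre ++ params.take k) ++ ", &") ::
      ppLinesB limit (params.drop (k + 1)) [head] (PySem.Str.len head + 2)
termination_by params.length
decreasing_by
  have := ppFitB_le limit params used
  simp only [List.length_drop]
  omega

def present_params_py_alt (paramlist : List String) (spacing : Int) : String :=
  let limit := 88 - spacing
  let sep := "\n" ++ String.ofList (List.replicate (max (spacing + 2) 0).toNat ' ')
  PySem.Str.join sep (ppLinesB limit paramlist [] 0)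

-- ===== PRECONDITION & SPEC =====
def Spec_present_params_py (paramlist : List String) (spacing : Int) (out : String) : Prop := out = present_params_py_alt paramlist spacing
instance (paramlist : List String) (spacing : Int) (out : String) : Decidable (Spec_present_params_py paramlist spacing out) := by unfold Spec_present_params_py; infer_instance

-- ===== CLAIM (what is proved, stated in full; the proofs are below) =====
def Claim_equal_present_params_py : Prop := ∀ (paramlist : List String) (spacing : Int), Dom_present_params_py paramlist spacing → Spec_present_params_py paramlist spacing (present_params_py paramlist spacing)

-- ===== LEMMAS AND PROOFS =====

-- A's line production, extracted as a recursion (proof device, not a port).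
def ppLinesA (spacing : Int) : List String → List String → Int → List String
  | [], line, _ => [PySem.Str.join ", " line]
  | p :: rest, line, length =>
    if length + PySem.Str.len p + 2 + spacing > 90 then
      (PySem.Str.join ", " line ++ ", &") :: ppLinesA spacing rest [p] (PySem.Str.len p + 2)
    else
      ppLinesA spacing rest (line ++ [p]) (length + PySem.Str.len p + 2)

theorem ppLoopA_lines (spacing : Int) (l : List String) :
    ∀ (line : List String) (length : Int) (done : List String),
      (ppLoopA spacing l (line, length, done)).2.2 ++
        [PySem.Str.join ", " (ppLoopA spacing l (line, length, done)).1] =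
      done ++ ppLinesA spacing l line length := by
  induction l with
  | nil => intro line length done; simp [ppLoopA, ppLinesA]
  | cons p rest ih =>
    intro line length done
    simp only [ppLoopA, ppLinesA]
    split
    · rw [ih]; simp
    · rw [ih]

-- B's recursion absorbs a fitting head param into the current line.
theorem ppLinesB_step (limit : Int) (p : String) (rest pre : List String) (used : Int)
    (h : ¬ used + PySem.Str.len p > limit) :
    ppLinesB limit (p :: rest) pre used =
      ppLinesB limit rest (pre ++ [p]) (used + PySem.Str.len p + 2) := by
  rw [ppLinesB, ppLinesB]
  have hfit : ppFitB limit (p :: rest) used = ppFitB limit rest (used + PySem.Str.len p + 2) + 1 := by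
    simp only [ppFitB, if_neg h]
  simp only [hfit, List.length_cons]
  by_cases hk : ppFitB limit rest (used + PySem.Str.len p + 2) = rest.length
  · simp
  · have hk' : ¬ (ppFitB limit rest (used + PySem.Str.len p + 2) + 1 = rest.length + 1) := by omega
    simp only [dif_neg hk, dif_neg hk']
    simp [List.getD, List.take_succ_cons, List.drop_succ_cons]

theorem ppLines_eq (spacing : Int) (l : List String) :
    ∀ (pre : List String) (used : Int),
      ppLinesA spacing l pre used = ppLinesB (88 - spacing) l pre used := by
  induction l with
  | nil =>
    intro pre used
    rw [ppLinesB]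
    simp [ppLinesA, ppFitB]
  | cons p rest ih =>
    intro pre used
    by_cases hbr : used + PySem.Str.len p + 2 + spacing > 90
    · have hb : used + PySem.Str.len p > 88 - spacing := by omega
      rw [ppLinesB]
      have hfit : ppFitB (88 - spacing) (p :: rest) used = 0 := by
        simp only [ppFitB, if_pos hb]
      simp only [hfit, List.length_cons]
      have h0 : ¬ ((0 : Nat) = rest.length + 1) := by omega
      simp only [dif_neg h0]
      simp only [ppLinesA, if_pos hbr]
      simp [List.getD, ih]
    · have hb : ¬ used + PySem.Str.len p > 88 - spacing := by omega
      rw [ppLinesB_step (88 - spacing) p rest pre used hb]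
      simp only [ppLinesA, if_neg hbr]
      exact ih (pre ++ [p]) (used + PySem.Str.len p + 2)

-- the separator string: " ".join(n empty strings) is n-1 spaces
theorem chars_join_empties (n : Nat) :
    PySem.Chars.join [' '] (List.replicate n []) = List.replicate (n - 1) ' ' := by
  induction n with
  | zero => rw [List.replicate_zero, PySem.Chars.join_nil]; rfl
  | succ m ih =>
    cases m with
    | zero => rw [List.replicate_one, PySem.Chars.join_singleton]; rfl
    | succ k =>
      rw [List.replicate_succ, List.replicate_succ (n := k), PySem.Chars.join_cons_cons,
        ← List.replicate_succ (n := k), ih]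
      simp [List.replicate_succ]

theorem join_space_empties (n : Nat) :
    PySem.Str.join " " (List.replicate n "") = String.ofList (List.replicate (n - 1) ' ') := by
  have h : (PySem.Str.join " " (List.replicate n "")).toList = List.replicate (n - 1) ' ' := by
    rw [PySem.Str.toList_join]
    simpa using chars_join_empties n
  rw [← h]; exact String.ofList_toList.symm

theorem sep_eq (spacing : Int) :
    "\n" ++ PySem.Str.join " " ((PySem.List.pyRange 0 (spacing + 3) 1).map (fun _ => "")) =
    "\n" ++ String.ofList (List.replicate (max (spacing + 2) 0).toNat ' ') := by
  have hm : (PySem.List.pyRange 0 (spacing + 3) 1).map (fun _ => "") =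
      List.replicate (spacing + 3).toNat "" := by
    rw [PySem.List.pyRange_one, List.map_map]
    simp [Function.comp_def]
  rw [hm, join_space_empties]
  have : (spacing + 3).toNat - 1 = (max (spacing + 2) 0).toNat := by omega
  rw [this]

-- ===== VERDICT (by name: the statement is the Claim_ definition above) =====
theorem present_params_py_spec : Claim_equal_present_params_py := by
  intro paramlist spacing _
  unfold Spec_present_params_py present_params_py present_params_py_alt
  simp only []
  rw [sep_eq]
  have h := ppLoopA_lines spacing paramlist [] 0 []
  simp only [List.nil_append] at h
  rw [h, ppLines_eq]
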